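-- pv_equiv track=rewrite | github.com/etaxbrianporter-dot/informational-asymmetry | verification_suite/lib/matching_tools.py | overlap_distribution
-- ===== SOURCE A (Python) =====
-- def overlap(m1, m2):
--     """Number of shared edges between two matchings."""
--     return len(m1 & m2)
--
-- def overlap_distribution(matchings):
--     """
--     Count pairs with each overlap value.
--     Returns dict: overlap_value -> count
--     """
--     N = len(matchings)
--     dist = {}
--     for i in range(N):
--         for j in range(i+1, N):
--             ov = 2 * overlap(matchings[i], matchings[j])
--             dist[ov] = dist.get(ov, 0) + 1
--     return dist
-- ===== SOURCE B (Python) =====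
-- def overlap_distribution(matchings):
--     """
--     Count pairs with each overlap value, via an inverted edge -> matching-indices
--     index instead of pairwise set intersections.
--     Returns dict: overlap_value -> count
--     """
--     N = len(matchings)
--     index = {}
--     for i in range(N):
--         for e in matchings[i]:
--             index[e] = index.get(e, []) + [i]
--     pair_overlap = {}
--     for occ in index.values():
--         rest = list(occ)
--         while rest:
--             i0 = rest.pop(0)
--             for j0 in rest:
--                 key = (i0, j0)
--                 pair_overlap[key] = pair_overlap.get(key, 0) + 1
--     dist = {}
--     for i in range(N):
--         for j in range(i + 1, N):
--             ov = 2 * pair_overlap.get((i, j), 0)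
--             dist[ov] = dist.get(ov, 0) + 1
--     return dist
-- ===== Notes on version B (the rewrite author's own statement) =====
-- stated objective: alternative
-- what changed: Replaces the pairwise set-intersection double loop with an inverted index (edge -> list of matching indices) from which every pair's overlap is accumulated, so no set intersection is ever computed.
import Mathlib
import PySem

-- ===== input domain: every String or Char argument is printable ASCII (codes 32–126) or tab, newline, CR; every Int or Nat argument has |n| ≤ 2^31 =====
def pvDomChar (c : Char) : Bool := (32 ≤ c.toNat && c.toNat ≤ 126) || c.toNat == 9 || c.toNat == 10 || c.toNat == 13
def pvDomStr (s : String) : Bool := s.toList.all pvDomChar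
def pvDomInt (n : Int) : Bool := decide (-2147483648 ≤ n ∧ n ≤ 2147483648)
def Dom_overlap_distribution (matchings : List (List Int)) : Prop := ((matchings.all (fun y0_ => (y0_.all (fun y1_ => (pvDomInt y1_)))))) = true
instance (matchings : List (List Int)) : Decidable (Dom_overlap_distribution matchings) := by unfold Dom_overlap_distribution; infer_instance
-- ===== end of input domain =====

-- B replaces A's pairwise set-intersection double loop by an inverted edge->indices
-- index from which all pair overlaps are accumulated (alternative algorithm, same result).


-- ===== PORT A =====
def pvOverlap (m1 m2 : List Int) : Int := Int.ofNat (PySem.Set.inter m1 m2).length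

def overlap_distribution (matchings : List (List Int)) : List (Int × Int) :=
  let N : Int := PySem.List.len matchings
  let dist : PySem.Dict Int Int :=
    (PySem.List.pyRange 0 N).foldl (fun dist i =>
      (PySem.List.pyRange (i+1) N).foldl (fun dist j =>
        let ov := 2 * pvOverlap (PySem.List.pyGetD matchings i []) (PySem.List.pyGetD matchings j [])
        dist.insert ov (dist.getD ov 0 + 1)) dist) PySem.Dict.empty
  dist.items

-- ===== PORT B =====
-- port of Source B's while-loop over the shrinking 'rest' list (rest.pop(0) = structural recursion)
def pvPairLoop (po : PySem.Dict (Int × Int) Int) (rest : List Int) : PySem.Dict (Int × Int) Int :=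
  match rest with
  | [] => po
  | i0 :: rest' =>
      pvPairLoop (rest'.foldl (fun po j0 =>
        po.insert (i0, j0) (po.getD (i0, j0) 0 + 1)) po) rest'

def overlap_distribution_alt (matchings : List (List Int)) : List (Int × Int) :=
  let N : Int := PySem.List.len matchings
  let index : PySem.Dict Int (List Int) :=
    (PySem.List.pyRange 0 N).foldl (fun idx i =>
      (PySem.List.pyGetD matchings i []).foldl (fun idx e =>
        idx.insert e (idx.getD e [] ++ [i])) idx) PySem.Dict.empty
  let pair_overlap : PySem.Dict (Int × Int) Int :=
    index.values.foldl (fun po occ => pvPairLoop po occ) PySem.Dict.empty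
  let dist : PySem.Dict Int Int :=
    (PySem.List.pyRange 0 N).foldl (fun dist i =>
      (PySem.List.pyRange (i+1) N).foldl (fun dist j =>
        let ov := 2 * pair_overlap.getD (i, j) 0
        dist.insert ov (dist.getD ov 0 + 1)) dist) PySem.Dict.empty
  dist.items

-- ===== PRECONDITION & SPEC =====
-- The Python parameter is a list of SETS; Pre_ states the set-encoding invariant
-- (each inner list holds distinct elements) under which a List Int encodes a Python set.
def Pre_overlap_distribution (matchings : List (List Int)) : Prop := ∀ m ∈ matchings, m.Nodup
instance (matchings : List (List Int)) : Decidable (Pre_overlap_distribution matchings) := by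
  unfold Pre_overlap_distribution; infer_instance

def pvWitness_overlap_distribution : List (List Int) := [[1, 2], [2, 3], [4]]

def Spec_overlap_distribution (matchings : List (List Int)) (out : List (Int × Int)) : Prop := out = overlap_distribution_alt matchings
instance (matchings : List (List Int)) (out : List (Int × Int)) : Decidable (Spec_overlap_distribution matchings out) := by unfold Spec_overlap_distribution; infer_instance

-- ===== CLAIM (what is proved, stated in full; the proofs are below) =====
def Claim_equal_overlap_distribution : Prop := ∀ (matchings : List (List Int)), Dom_overlap_distribution matchings → Pre_overlap_distribution matchings → Spec_overlap_distribution matchings (overlap_distribution matchings)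

-- ===== LEMMAS AND PROOFS =====

-- the multiset of index pairs the while-loop of Source B generates from one occurrence list
def pvPairs : List Int → List (Int × Int)
  | [] => []
  | x :: r => r.map (fun y => (x, y)) ++ pvPairs r

theorem pvPairLoop_eq (occ : List Int) (po : PySem.Dict (Int × Int) Int) :
    pvPairLoop po occ =
      (pvPairs occ).foldl (fun po k => po.insert k (po.getD k 0 + 1)) po := by
  induction occ generalizing po with
  | nil => rfl
  | cons x r ih =>
      rw [pvPairLoop, ih, pvPairs, List.foldl_append, List.foldl_map]

theorem pvPairs_count (occ : List Int) (hso : occ.Pairwise (· < ·)) {i j : Int}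
    (hij : i < j) :
    (pvPairs occ).count (i, j) = if i ∈ occ ∧ j ∈ occ then 1 else 0 := by
  induction occ with
  | nil => simp [pvPairs]
  | cons x r ih =>
      rcases List.pairwise_cons.mp hso with ⟨hx, hr⟩
      have hnd : r.Nodup := hr.nodup
      rw [pvPairs, List.count_append]
      have hmapc : (r.map (fun y => (x, y))).count (i, j) =
          if x = i then r.count j else 0 := by
        rw [List.count, List.countP_map]
        by_cases hxi : x = i
        · subst hxi
          rw [if_pos rfl, List.count]
          exact List.countP_congr (fun y _ => by simp)
        · rw [if_neg hxi, List.countP_eq_zero.mpr]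
          intro y _
          simp only [Function.comp_def, beq_iff_eq, Prod.mk.injEq]
          rintro ⟨h1, _⟩
          exact hxi h1
      rw [hmapc, ih hr]
      by_cases hxi : x = i
      · subst hxi
        have hcount2 : (if x ∈ r ∧ j ∈ r then 1 else 0) = 0 := by
          by_cases hxr : x ∈ r
          · exact absurd (hx x hxr) (lt_irrefl x)
          · simp [hxr]
        rw [hcount2, if_pos rfl]
        have hjx : j ≠ x := ne_of_gt hij
        have hcj : r.count j = if j ∈ r then 1 else 0 := by
          by_cases hjr : j ∈ r
          · rw [List.count_eq_one_of_mem hnd hjr]; simp [hjr]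
          · rw [List.count_eq_zero.mpr hjr]; simp [hjr]
        rw [hcj]
        have hmemx : x ∈ x :: r := List.mem_cons_self
        by_cases hjr : j ∈ r
        · simp [hjr, hmemx]
        · have hjn : j ∉ x :: r := by
            intro hm; rcases List.mem_cons.mp hm with h | h
            · exact hjx h
            · exact hjr h
          simp [hjr, hmemx, hjn]
      · rw [if_neg hxi, Nat.zero_add]
        have himem : (i ∈ x :: r) ↔ i ∈ r := by
          constructor
          · intro hm; rcases List.mem_cons.mp hm with h | h
            · exact absurd h.symm hxi
            · exact h
          · exact List.mem_cons_of_mem _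
        by_cases hir : i ∈ r
        · have hji : j ≠ x := by
            intro hjx; subst hjx
            exact absurd (hx i hir) (not_lt_of_gt hij)
          have hjmem : (j ∈ x :: r) ↔ j ∈ r := by
            constructor
            · intro hm; rcases List.mem_cons.mp hm with h | h
              · exact absurd h hji
              · exact h
            · exact List.mem_cons_of_mem _
          simp [himem, hjmem]
        · simp [himem, hir]

-- getD after the inner index loop over one matching m (for e in m: index[e] = index.get(e,[])+[i])
theorem pv_idx_inner (m : List Int) (i : Int) (d : PySem.Dict Int (List Int)) (e : Int)
    (hm : m.Nodup) :
    (m.foldl (fun idx x => idx.insert x (idx.getD x [] ++ [i])) d).getD e []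
      = d.getD e [] ++ (if e ∈ m then [i] else []) := by
  induction m generalizing d with
  | nil => simp
  | cons x r ih =>
      rcases List.nodup_cons.mp hm with ⟨hxr, hr⟩
      rw [List.foldl_cons, ih _ hr]
      by_cases hex : e = x
      · subst hex
        rw [PySem.Dict.getD_insert_self]
        have : e ∉ r := hxr
        simp [this]
      · rw [PySem.Dict.getD_insert_of_ne _ _ _ hex]
        have : (e ∈ x :: r) = (e ∈ r) := by
          simp [List.mem_cons, hex]
        simp [this]

-- getD after building the whole index over an index list l
theorem pv_idx_getD (matchings : List (List Int)) (l : List Int)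
    (d : PySem.Dict Int (List Int)) (e : Int)
    (hl : ∀ i ∈ l, (PySem.List.pyGetD matchings i ([] : List Int)).Nodup) :
    (l.foldl (fun idx i =>
        (PySem.List.pyGetD matchings i []).foldl (fun idx x =>
          idx.insert x (idx.getD x [] ++ [i])) idx) d).getD e []
      = d.getD e [] ++ l.filter (fun i => decide (e ∈ PySem.List.pyGetD matchings i ([] : List Int))) := by
  induction l generalizing d with
  | nil => simp
  | cons a l ih =>
      rw [List.foldl_cons, ih _ (fun i hi => hl i (List.mem_cons_of_mem _ hi)),
        pv_idx_inner _ _ _ _ (hl a List.mem_cons_self), List.filter_cons, List.append_assoc]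
      by_cases hea : e ∈ PySem.List.pyGetD matchings a ([] : List Int) <;> simp [hea]

-- keys of the index = set of all edges occurring in matchings[i], i ∈ l
theorem pv_idx_keys (matchings : List (List Int)) (l : List Int)
    (d : PySem.Dict Int (List Int)) :
    (l.foldl (fun idx i =>
        (PySem.List.pyGetD matchings i []).foldl (fun idx x =>
          idx.insert x (idx.getD x [] ++ [i])) idx) d).keys
      = PySem.Set.update d.keys (l.flatMap (fun i => PySem.List.pyGetD matchings i [])) := by
  induction l generalizing d with
  | nil => simp [PySem.Set.update]
  | cons a l ih =>
      rw [List.foldl_cons, ih, List.flatMap_cons,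
        PySem.Dict.keys_foldl_insert (PySem.List.pyGetD matchings a [])
          (fun idx x => idx.getD x [] ++ [a]) d]
      simp [PySem.Set.update, List.foldl_append]

-- getD of the pair_overlap dict after folding pvPairLoop over all occurrence lists
theorem pv_po_getD (os : List (List Int)) (d : PySem.Dict (Int × Int) Int) (k : Int × Int) :
    (os.foldl (fun po occ => pvPairLoop po occ) d).getD k 0
      = d.getD k 0 + ((os.map (fun occ => ((pvPairs occ).count k : Int))).sum) := by
  induction os generalizing d with
  | nil => simp
  | cons occ os ih =>
      rw [List.foldl_cons, ih, pvPairLoop_eq, PySem.Dict.getD_foldl_insert_add_one,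
        List.map_cons, List.sum_cons]
      ring

theorem pv_pyRange_pairwise (n : Nat) :
    (PySem.List.pyRange 0 (n : Int)).Pairwise (· < ·) := by
  rw [PySem.List.pyRange_zero_natCast]
  exact List.Pairwise.map _ (fun a b h => Int.ofNat_lt.mpr h) List.pairwise_lt_range

-- the central lemma: for 0 ≤ i < j < N the accumulated pair overlap equals A's overlap
theorem pv_key (matchings : List (List Int)) (hpre : Pre_overlap_distribution matchings)
    {i j : Int} (h0 : 0 ≤ i) (hij : i < j) (hj : j < PySem.List.len matchings) :
    (((PySem.List.pyRange 0 (PySem.List.len matchings)).foldl (fun idx i =>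
        (PySem.List.pyGetD matchings i []).foldl (fun idx e =>
          idx.insert e (idx.getD e [] ++ [i])) idx) PySem.Dict.empty).values.foldl
        (fun po occ => pvPairLoop po occ) PySem.Dict.empty).getD (i, j) 0
      = pvOverlap (PySem.List.pyGetD matchings i []) (PySem.List.pyGetD matchings j []) := by
  have h0j : 0 ≤ j := le_of_lt (lt_of_le_of_lt h0 hij)
  have hiN : i < PySem.List.len matchings := lt_trans hij hj
  have hN : PySem.List.len matchings = ((matchings.length : Nat) : Int) := rfl
  set mi := PySem.List.pyGetD matchings i ([] : List Int) with hmi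
  set mj := PySem.List.pyGetD matchings j ([] : List Int) with hmj
  have hnodup : ∀ t : Int, 0 ≤ t → t < PySem.List.len matchings →
      (PySem.List.pyGetD matchings t ([] : List Int)).Nodup := by
    intro t h0t htN
    rw [PySem.List.pyGetD_of_nonneg _ _ h0t]
    have hlt : t.toNat < matchings.length := by
      rw [hN] at htN; omega
    rw [List.getD_eq_getElem _ _ hlt]
    exact hpre _ (List.getElem_mem hlt)
  have hminod : mi.Nodup := hnodup i h0 hiN
  have hmjnod : mj.Nodup := hnodup j h0j hj
  set idx := ((PySem.List.pyRange 0 (PySem.List.len matchings)).foldl (fun idx i =>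
      (PySem.List.pyGetD matchings i []).foldl (fun idx e =>
        idx.insert e (idx.getD e [] ++ [i])) idx) PySem.Dict.empty) with hidx
  have hkeys : idx.keys = PySem.Set.update []
      ((PySem.List.pyRange 0 (PySem.List.len matchings)).flatMap
        (fun t => PySem.List.pyGetD matchings t [])) := by
    rw [hidx, pv_idx_keys, PySem.Dict.keys_empty]
  have hknd : idx.keys.Nodup := by
    rw [hkeys]; exact PySem.Set.nodup_update [] _ List.nodup_nil
  have hocc : ∀ e : Int, idx.getD e [] =
      (PySem.List.pyRange 0 (PySem.List.len matchings)).filter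
        (fun t => decide (e ∈ PySem.List.pyGetD matchings t ([] : List Int))) := by
    intro e
    rw [hidx, pv_idx_getD matchings _ _ e, PySem.Dict.getD_empty, List.nil_append]
    intro t ht
    rcases PySem.List.mem_pyRange_one.mp ht with ⟨h1, h2⟩
    exact hnodup t h1 h2
  have hcnt : ∀ e : Int, ((pvPairs (idx.getD e [])).count (i, j) : Int) =
      if (decide (e ∈ mi) && decide (e ∈ mj)) = true then 1 else 0 := by
    intro e
    rw [hocc e]
    have hpw : ((PySem.List.pyRange 0 (PySem.List.len matchings)).filter
        (fun t => decide (e ∈ PySem.List.pyGetD matchings t ([] : List Int)))).Pairwise (· < ·) := by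
      refine List.Pairwise.sublist List.filter_sublist ?_
      rw [hN]
      exact pv_pyRange_pairwise matchings.length
    rw [pvPairs_count _ hpw hij]
    have hmemi : (i ∈ (PySem.List.pyRange 0 (PySem.List.len matchings)).filter
        (fun t => decide (e ∈ PySem.List.pyGetD matchings t ([] : List Int)))) ↔ e ∈ mi := by
      rw [List.mem_filter, PySem.List.mem_pyRange_one]
      constructor
      · rintro ⟨_, h⟩; rw [hmi]; exact of_decide_eq_true h
      · intro h; exact ⟨⟨h0, hiN⟩, decide_eq_true (hmi ▸ h)⟩
    have hmemj : (j ∈ (PySem.List.pyRange 0 (PySem.List.len matchings)).filter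
        (fun t => decide (e ∈ PySem.List.pyGetD matchings t ([] : List Int)))) ↔ e ∈ mj := by
      rw [List.mem_filter, PySem.List.mem_pyRange_one]
      constructor
      · rintro ⟨_, h⟩; rw [hmj]; exact of_decide_eq_true h
      · intro h; exact ⟨⟨h0j, hj⟩, decide_eq_true (hmj ▸ h)⟩
    have hiff := and_congr hmemi hmemj
    by_cases hc : e ∈ mi ∧ e ∈ mj
    · rw [if_pos (hiff.mpr hc)]
      simp [hc.1, hc.2]
    · rw [if_neg (fun h => hc (hiff.mp h))]
      have hb : ¬ ((decide (e ∈ mi) && decide (e ∈ mj)) = true) := by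
        simpa using hc
      rw [if_neg hb]
      rfl
  rw [pv_po_getD, PySem.Dict.getD_empty, zero_add,
    PySem.Dict.values_eq_map_keys idx hknd ([] : List Int), List.map_map]
  have hmape : (idx.keys.map (((fun occ => ((pvPairs occ).count (i, j) : Int)) ∘
      fun k => idx.getD k []))) =
      idx.keys.map (fun e => if (decide (e ∈ mi) && decide (e ∈ mj)) = true then 1 else 0) :=
    List.map_congr_left (fun e _ => hcnt e)
  rw [hmape, PySem.List.sum_map_ite_one_zero]
  rw [pvOverlap]
  congr 1
  rw [List.countP_eq_length_filter, PySem.Set.inter]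
  apply List.Perm.length_eq
  rw [List.perm_ext_iff_of_nodup (hknd.filter _) (hminod.filter _)]
  intro e
  rw [List.mem_filter, List.mem_filter]
  constructor
  · rintro ⟨_, h⟩
    simp only [Bool.and_eq_true, decide_eq_true_eq] at h
    exact ⟨h.1, (PySem.Set.contains_iff _ _).mpr h.2⟩
  · rintro ⟨h1, h2⟩
    have hej : e ∈ mj := (PySem.Set.contains_iff _ _).mp h2
    have hek : e ∈ idx.keys := by
      rw [hkeys, PySem.Set.mem_update]
      right
      exact List.mem_flatMap.mpr ⟨i, PySem.List.mem_pyRange_one.mpr ⟨h0, hiN⟩, hmi ▸ h1⟩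
    exact ⟨hek, by simp [h1, hej]⟩

-- ===== VERDICT (by name: the statement is the Claim_ definition above) =====
theorem overlap_distribution_spec : Claim_equal_overlap_distribution := by
  intro matchings _hdom hpre
  unfold Spec_overlap_distribution
  unfold overlap_distribution overlap_distribution_alt
  simp only []
  congr 1
  apply PySem.List.foldl_congr_mem
  intro d i hi
  apply PySem.List.foldl_congr_mem
  intro d' j hj
  rcases PySem.List.mem_pyRange_one.mp hi with ⟨h0i, hiN⟩
  rcases PySem.List.mem_pyRange_one.mp hj with ⟨hij', hjN⟩
  rw [pv_key matchings hpre h0i (by omega) hjN]
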